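-- pv_equiv track=rewrite | github.com/OlaTheTechie/yt-video-downloader-system | cli/interfaces.py | validate_output_path
-- ===== SOURCE A (Python) =====
-- def validate_output_path(path: str) -> bool:
--     """Validate output path format."""
--     if not path or not isinstance(path, str):
--         return False
--
--     # Basic path validation - check for invalid characters
--     # Note: backslash is valid for Windows paths, colon is valid for drive letters
--     invalid_chars = ['<', '>', '"', '|', '?', '*']
--
--     # Allow colon only if it's part of a Windows drive letter (e.g., C:)
--     if ':' in path:
--         # Check if colon is in a valid position for Windows drive letter
--         colon_positions = [i for i, char in enumerate(path) if char == ':']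
--         for pos in colon_positions:
--             # Valid if it's at position 1 (like C:) or preceded by a drive letter
--             if pos != 1 or not path[pos-1].isalpha():
--                 return False
--
--     return not any(char in path for char in invalid_chars)
-- ===== SOURCE B (Python) =====
-- def validate_output_path(path: str) -> bool:
--     """Validate output path format (single pass over the characters)."""
--     if not path or not isinstance(path, str):
--         return False
--     for i, char in enumerate(path):
--         if char in '<>"|?*':
--             return False
--         if char == ':' and not (i == 1 and path[0].isalpha()):
--             return False
--     return True
-- ===== Notes on version B (the rewrite author's own statement) =====
-- stated objective: simpler
-- what changed: Replaced A's three traversals (colon membership test, building a colon-position list then looping over it, and a per-invalid-char substring scan) with one loop over enumerate(path) that rejects each character in place.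
import Mathlib
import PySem

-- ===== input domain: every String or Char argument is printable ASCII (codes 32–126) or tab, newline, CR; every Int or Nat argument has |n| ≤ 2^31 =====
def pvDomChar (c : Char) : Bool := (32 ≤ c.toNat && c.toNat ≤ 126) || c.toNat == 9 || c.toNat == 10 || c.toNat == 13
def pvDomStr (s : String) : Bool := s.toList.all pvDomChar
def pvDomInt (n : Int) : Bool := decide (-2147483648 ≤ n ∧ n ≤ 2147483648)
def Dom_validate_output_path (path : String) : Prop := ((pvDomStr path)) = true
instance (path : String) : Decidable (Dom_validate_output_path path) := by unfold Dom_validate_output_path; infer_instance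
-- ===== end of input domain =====

-- B is the same validation done in ONE pass over enumerate(path) instead of A's several scans (simpler).

-- ===== PORT A =====
-- the 'for pos in colon_positions: if pos != 1 or not path[pos-1].isalpha(): return False' loop;
-- path[pos-1] is only reached when pos == 1 (Python's 'or' short-circuits), so the pyGetD default is never observed
def pvA_checkColons (chars : List Char) : List Int → Bool
  | [] => true
  | pos :: rest =>
    if pos ≠ 1 || !(PySem.Chars.isalpha (PySem.List.pyGetD chars (pos - 1) ' ')) then false
    else pvA_checkColons chars rest

def validate_output_path (path : String) : Bool :=
  let chars := path.toList
  if chars.isEmpty then false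
  else
    let invalid_chars : List Char := ['<', '>', '"', '|', '?', '*']
    if PySem.Chars.isIn [':'] chars &&
       !(pvA_checkColons chars
           (((PySem.List.enumerate chars 0).filter (fun p => p.2 == ':')).map (fun p => p.1)))
    then false
    else !(invalid_chars.any (fun c => PySem.Chars.isIn [c] chars))

-- ===== PORT B =====
-- 'for i, char in enumerate(path): …' — one pass; path[0] exists because the empty string was rejected
def pvB_go (chars : List Char) : List (Int × Char) → Bool
  | [] => true
  | (i, c) :: rest =>
    if (['<', '>', '"', '|', '?', '*'] : List Char).contains c then false
    else if c == ':' && !(i == 1 && PySem.Chars.isalpha (PySem.List.pyGetD chars 0 ' ')) then false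
    else pvB_go chars rest

def validate_output_path_alt (path : String) : Bool :=
  let chars := path.toList
  if chars.isEmpty then false
  else pvB_go chars (PySem.List.enumerate chars 0)

-- ===== PRECONDITION & SPEC =====
def Spec_validate_output_path (path : String) (out : Bool) : Prop := out = validate_output_path_alt path
instance (path : String) (out : Bool) : Decidable (Spec_validate_output_path path out) := by unfold Spec_validate_output_path; infer_instance

-- ===== CLAIM (what is proved, stated in full; the proofs are below) =====
def Claim_equal_validate_output_path : Prop := ∀ (path : String), Dom_validate_output_path path → Spec_validate_output_path path (validate_output_path path)

-- ===== LEMMAS AND PROOFS =====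

-- abbreviations used only by the proofs
def pvInv : List Char := ['<', '>', '"', '|', '?', '*']
def pvGInv (p : Int × Char) : Bool := !(pvInv.contains p.2)
def pvGCol (a0 : Bool) (p : Int × Char) : Bool := !(p.2 == ':') || (p.1 == 1 && a0)

theorem pv_all_and {α : Type} (l : List α) (p q : α → Bool) :
    l.all (fun x => p x && q x) = (l.all p && l.all q) := by
  induction l with
  | nil => rfl
  | cons x xs ih =>
    simp only [List.all_cons, ih, Bool.and_assoc]
    rcases p x <;> rcases q x <;> simp

theorem pvA_checkColons_eq_all (chars : List Char) (ps : List Int) :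
    pvA_checkColons chars ps
      = ps.all (fun pos => pos == 1 && PySem.Chars.isalpha (PySem.List.pyGetD chars 0 ' ')) := by
  induction ps with
  | nil => rfl
  | cons pos rest ih =>
    by_cases h : pos = 1
    · subst h; simp [pvA_checkColons, ih]
    · simp [pvA_checkColons, h]

theorem pvB_go_eq_all (chars : List Char) (l : List (Int × Char)) :
    pvB_go chars l
      = l.all (fun p => pvGInv p &&
          pvGCol (PySem.Chars.isalpha (PySem.List.pyGetD chars 0 ' ')) p) := by
  induction l with
  | nil => rfl
  | cons p rest ih =>
    obtain ⟨i, c⟩ := p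
    rw [List.all_cons, ← ih]
    show (if pvInv.contains c then false
          else if c == ':' && !(i == 1 && PySem.Chars.isalpha (PySem.List.pyGetD chars 0 ' '))
          then false else pvB_go chars rest) = _
    unfold pvGInv pvGCol
    rcases hm : pvInv.contains c with _ | _
    · rcases hc : (c == ':') with _ | _
      · simp
      · rcases hd : (i == 1 && PySem.Chars.isalpha (PySem.List.pyGetD chars 0 ' ')) with _ | _ <;>
          simp
    · simp

theorem isIn_singleton (c : Char) (chars : List Char) :
    PySem.Chars.isIn [c] chars = chars.contains c := by
  rcases h : chars.contains c with _ | _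
  · rw [PySem.Chars.isIn_eq_false_iff]
    intro hinf
    exact (by simpa using h : c ∉ chars) (hinf.subset (by simp))
  · rw [PySem.Chars.isIn_iff_infix]
    have : c ∈ chars := by simpa using h
    obtain ⟨l1, l2, rfl⟩ := List.append_of_mem this
    exact ⟨l1, l2, by simp⟩

-- A's final 'not any(char in path for char in invalid_chars)' as an all over enumerate(path)
theorem pv_hinv (chars : List Char) :
    (!(pvInv.any (fun c => PySem.Chars.isIn [c] chars)))
      = (PySem.List.enumerate chars 0).all pvGInv := by
  have h1 : pvInv.any (fun c => PySem.Chars.isIn [c] chars)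
      = chars.any (fun c => pvInv.contains c) := by
    simp only [isIn_singleton]
    rw [Bool.eq_iff_iff]
    simp only [List.any_eq_true, List.contains_eq_mem, decide_eq_true_eq]
    exact ⟨fun ⟨c, h1, h2⟩ => ⟨c, h2, h1⟩, fun ⟨c, h1, h2⟩ => ⟨c, h2, h1⟩⟩
  have h2 : (PySem.List.enumerate chars 0).any (fun p => pvInv.contains p.2)
      = chars.any (fun c => pvInv.contains c) := by
    conv_rhs => rw [← PySem.List.map_snd_enumerate chars 0]
    rw [List.any_map]; rfl
  rw [h1, ← h2]
  show (!(PySem.List.enumerate chars 0).any fun p => pvInv.contains p.2)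
      = (PySem.List.enumerate chars 0).all fun p => !(pvInv.contains p.2)
  exact List.not_any_eq_all_not

-- A's colon-position loop as an all over enumerate(path)
theorem pv_hcolon (chars : List Char) :
    pvA_checkColons chars
        (((PySem.List.enumerate chars 0).filter (fun p => p.2 == ':')).map (fun p => p.1))
      = (PySem.List.enumerate chars 0).all
          (pvGCol (PySem.Chars.isalpha (PySem.List.pyGetD chars 0 ' '))) := by
  rw [pvA_checkColons_eq_all, List.all_map, List.all_filter]
  rfl

-- when ':' does not occur in chars, the colon loop is vacuously true
theorem pv_colon_vacuous (chars : List Char) (h : chars.contains ':' = false) :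
    (PySem.List.enumerate chars 0).all
        (pvGCol (PySem.Chars.isalpha (PySem.List.pyGetD chars 0 ' '))) = true := by
  rw [List.all_eq_true]
  rintro ⟨i, c⟩ hmem
  have hc : c ∈ chars := by
    have := List.mem_map_of_mem (f := fun p : Int × Char => p.2) hmem
    rwa [PySem.List.map_snd_enumerate] at this
  have : (c == ':') = false := by
    rcases hcc : (c == ':') with _ | _
    · rfl
    · exact absurd h (by simp [List.contains_eq_mem, (beq_iff_eq.mp hcc ▸ hc)])
  simp [pvGCol, this]

theorem pv_key (chars : List Char) :
    (if chars.isEmpty then false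
     else
       if PySem.Chars.isIn [':'] chars &&
          !(pvA_checkColons chars
              (((PySem.List.enumerate chars 0).filter (fun p => p.2 == ':')).map (fun p => p.1)))
       then false
       else !((['<', '>', '"', '|', '?', '*'] : List Char).any (fun c => PySem.Chars.isIn [c] chars)))
    = (if chars.isEmpty then false else pvB_go chars (PySem.List.enumerate chars 0)) := by
  rcases he : chars.isEmpty with _ | _
  · simp only [Bool.false_eq_true, if_false]
    rw [pvB_go_eq_all, pv_all_and, ← pv_hinv chars, ← pv_hcolon chars]
    rcases hin : PySem.Chars.isIn [':'] chars with _ | _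
    · have hnc : chars.contains ':' = false := by rw [← isIn_singleton]; exact hin
      have hv := pv_colon_vacuous chars hnc
      rw [← pv_hcolon chars] at hv
      simp [hv, pvInv]
    · simp only [Bool.true_and]
      rcases hcol : pvA_checkColons chars
          (((PySem.List.enumerate chars 0).filter (fun p => p.2 == ':')).map (fun p => p.1)) with _ | _ <;>
        simp [hcol, Bool.and_comm, pvInv]
  · simp only [if_true]

-- ===== VERDICT (by name: the statement is the Claim_ definition above) =====
theorem validate_output_path_spec : Claim_equal_validate_output_path := by
  intro path _
  unfold Spec_validate_output_path validate_output_path validate_output_path_alt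
  exact pv_key path.toList
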